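-- pv_equiv track=rewrite | github.com/jakuberan/AoC | src/day14_supp.py | assign_float
-- ===== SOURCE A (Python) =====
-- def assign_float(mem, value, memory):
--     """
--     Function for memory retrieval
--     """
--     if mem.count("X") == 0:
--         memory[int(mem, 2)] = value
--         return memory
--     else:
--         x = mem.index("X")
--         memory = assign_float(mem[:x] + "0" + mem[(x + 1) :], value, memory)
--         memory = assign_float(mem[:x] + "1" + mem[(x + 1) :], value, memory)
--
--     return memory
-- ===== SOURCE B (Python) =====
-- def assign_float(mem, value, memory):
--     """
--     Function for memory retrieval
--     """
--     # One right-to-left arithmetic pass: base address (X treated as 0) and the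
--     # bit-weight of every X, then expand the weights into all 2**k addresses.
--     base = 0
--     weights = []
--     w = 1
--     for c in reversed(mem):
--         if c == "1":
--             base += w
--         elif c == "X":
--             weights.append(w)
--         w *= 2
--     addrs = [base]
--     for w in reversed(weights):  # most-significant X first, matching A's order
--         addrs = [a + b for a in addrs for b in (0, w)]
--     for a in addrs:
--         memory[a] = value
--     return memory
-- ===== Notes on version B (the rewrite author's own statement) =====
-- stated objective: faster
-- what changed: A recursively re-slices and re-parses the string for every wildcard substitution (one int(...,2) per generated address); B makes a single right-to-left arithmetic pass computing the base address and the bit weight of each 'X', then expands the weights into all 2^k addresses by integer additions only.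
-- outside the precondition, e.g. on assign_float('-1', 5, {}): A returns {-1: 5}, B returns {1: 5}; on assign_float('1_0', 5, {}): A returns {2: 5}, B returns {4: 5}
import Mathlib
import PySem

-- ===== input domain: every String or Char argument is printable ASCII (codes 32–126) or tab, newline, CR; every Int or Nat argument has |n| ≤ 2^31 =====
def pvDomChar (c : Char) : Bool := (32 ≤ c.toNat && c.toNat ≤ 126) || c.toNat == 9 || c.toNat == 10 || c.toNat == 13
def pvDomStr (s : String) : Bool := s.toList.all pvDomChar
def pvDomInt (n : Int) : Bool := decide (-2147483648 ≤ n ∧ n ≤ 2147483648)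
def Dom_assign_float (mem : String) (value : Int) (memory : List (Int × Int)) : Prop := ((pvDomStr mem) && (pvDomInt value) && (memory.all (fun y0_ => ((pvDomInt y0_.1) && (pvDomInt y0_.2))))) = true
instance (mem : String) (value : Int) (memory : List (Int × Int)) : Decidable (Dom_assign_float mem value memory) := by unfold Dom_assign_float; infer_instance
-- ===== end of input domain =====

-- B replaces A's recursive wildcard-substitution on strings (one slice+parse per generated
-- address) by a single right-to-left arithmetic pass computing a base address and the bit
-- weight of every 'X', then expands the weights into all addresses by pure integer addition.

-- ===== PORT A =====

-- memory[k] = value  (Python dict assignment: overwrite keeps position, fresh keys append)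
def pvSet (d : List (Int × Int)) (k v : Int) : List (Int × Int) :=
  (PySem.Dict.insert (PySem.Dict.mk d) k v).items

-- int(s, 2): exact on nonempty all-'0'/'1' strings (the Pre_ domain); none = ValueError.
-- (CPython's int() additionally strips whitespace/sign/underscores — those inputs are
-- excluded by Pre_assign_float below.)
def pvInt2? (s : List Char) : Option Int :=
  if s ≠ [] ∧ s.all (fun c => c = '0' || c = '1') then
    some (s.foldl (fun a c => 2 * a + (if c = '1' then 1 else 0)) 0)
  else none

-- termination helper for pvAssignA (cited by decreasing_by): substituting a non-'X' char
-- at the first 'X' position strictly decreases the number of 'X's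
theorem pvCountSubLt {m : List Char} {x : Nat} (h : PySem.List.index? m 'X' = some x)
    {c : Char} (hc : c ≠ 'X') :
    (m.take x ++ c :: m.drop (x + 1)).count 'X' < m.count 'X' := by
  obtain ⟨pre, suf, rfl, hlen, hpre⟩ := (PySem.List.index?_eq_some_iff _ _ _).1 h
  subst hlen
  simp [List.count_append, hc, List.count_eq_zero.2 hpre]

-- recursive body of A over the character list (mem.count("X"), mem.index("X"),
-- mem[:x] + "0" + mem[x+1:] as take/drop — exact, x is an in-range nonnegative index)
def pvAssignA (m : List Char) (value : Int) (memory : List (Int × Int)) : List (Int × Int) :=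
  if m.count 'X' = 0 then
    match pvInt2? m with
    | some n => pvSet memory n value
    | none => memory              -- int() raises ValueError: outside Pre_
  else
    match h : PySem.List.index? m 'X' with
    | none => memory              -- unreachable: count ≠ 0 means 'X' ∈ m
    | some x =>
        pvAssignA (m.take x ++ '1' :: m.drop (x + 1)) value
          (pvAssignA (m.take x ++ '0' :: m.drop (x + 1)) value memory)
termination_by m.count 'X'
decreasing_by
  · exact pvCountSubLt h (by decide)
  · exact pvCountSubLt h (by decide)

def assign_float (mem : String) (value : Int) (memory : List (Int × Int)) : List (Int × Int) :=
  pvAssignA mem.toList value memory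

-- ===== PORT B =====

def assign_float_alt (mem : String) (value : Int) (memory : List (Int × Int)) : List (Int × Int) :=
  -- for c in reversed(mem): accumulate (base, weights, w)
  let s := mem.toList.reverse.foldl
      (fun (p : Int × List Int × Int) c =>
        if c = '1' then (p.1 + p.2.2, p.2.1, p.2.2 * 2)
        else if c = 'X' then (p.1, p.2.1 ++ [p.2.2], p.2.2 * 2)
        else (p.1, p.2.1, p.2.2 * 2))
      ((0 : Int), ([] : List Int), (1 : Int))
  -- for w in reversed(weights): addrs = [a + b for a in addrs for b in (0, w)]
  let addrs := s.2.1.reverse.foldl (fun as w => as.flatMap (fun a => [a, a + w])) [s.1]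
  addrs.foldl (fun d a => pvSet d a value) memory

-- ===== PRECONDITION & SPEC =====
-- Pre_ restricts mem to nonempty strings over {'0','1','X'}: on other strings A either
-- raises ValueError from int(mem, 2), or (when int() happens to accept the string via its
-- sign/whitespace/underscore decorations) returns a value B does not promise to match —
-- see the cites in claim.json.
def Pre_assign_float (mem : String) (value : Int) (memory : List (Int × Int)) : Prop :=
  mem.toList ≠ [] ∧ mem.toList.all (fun c => c == '0' || c == '1' || c == 'X') = true
instance (mem : String) (value : Int) (memory : List (Int × Int)) : Decidable (Pre_assign_float mem value memory) := by unfold Pre_assign_float; infer_instance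

def pvWitness_assign_float : String × Int × (List (Int × Int)) := ("X0", 5, [(1, 2)])

def Spec_assign_float (mem : String) (value : Int) (memory : List (Int × Int)) (out : List (Int × Int)) : Prop := out = assign_float_alt mem value memory
instance (mem : String) (value : Int) (memory : List (Int × Int)) (out : List (Int × Int)) : Decidable (Spec_assign_float mem value memory out) := by unfold Spec_assign_float; infer_instance

-- ===== CLAIM (what is proved, stated in full; the proofs are below) =====
def Claim_equal_assign_float : Prop := ∀ (mem : String) (value : Int) (memory : List (Int × Int)), Dom_assign_float mem value memory → Pre_assign_float mem value memory → Spec_assign_float mem value memory (assign_float mem value memory)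

-- ===== LEMMAS AND PROOFS =====

-- binary value of a 0/1 string, with every other character (in particular 'X') read as 0
def pvBval (m : List Char) : Int := m.foldl (fun a c => 2 * a + (if c = '1' then 1 else 0)) 0

-- bit weights of the 'X' positions, most significant first
def pvWts : List Char → List Int
  | [] => []
  | c :: t => if c = 'X' then ((2 : Int) ^ t.length) :: pvWts t else pvWts t

def pvExpand (ws : List Int) (as' : List Int) : List Int :=
  ws.foldl (fun as w => as.flatMap (fun a => [a, a + w])) as'

theorem pvBval_foldl (t : List Char) (a : Int) :
    t.foldl (fun a c => 2 * a + (if c = '1' then 1 else 0)) a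
      = a * 2 ^ t.length + pvBval t := by
  induction t generalizing a with
  | nil => simp [pvBval]
  | cons c t ih =>
    have hc : pvBval (c :: t)
        = (2 * 0 + (if c = '1' then 1 else 0)) * 2 ^ t.length + pvBval t := by
      rw [pvBval, List.foldl_cons, ih]
    rw [List.foldl_cons, ih, hc, List.length_cons, pow_succ]
    ring

theorem pvBval_cons (c : Char) (t : List Char) :
    pvBval (c :: t) = (if c = '1' then 1 else 0) * 2 ^ t.length + pvBval t := by
  rw [pvBval, List.foldl_cons, pvBval_foldl]
  ring

theorem pvBval_append (u v : List Char) :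
    pvBval (u ++ v) = pvBval u * 2 ^ v.length + pvBval v := by
  rw [pvBval, List.foldl_append, pvBval_foldl]
  rfl

theorem pvWts_append_of_not_mem {u : List Char} (v : List Char) (h : 'X' ∉ u) :
    pvWts (u ++ v) = pvWts v := by
  induction u with
  | nil => rfl
  | cons c t ih =>
    simp only [List.mem_cons, not_or] at h
    simp [pvWts, Ne.symm h.1, ih h.2]

theorem pvWts_eq_nil {u : List Char} (h : 'X' ∉ u) : pvWts u = [] := by
  have := pvWts_append_of_not_mem (u := u) [] h
  simpa using this

theorem pvExpand_append (ws a b : List Int) :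
    pvExpand ws (a ++ b) = pvExpand ws a ++ pvExpand ws b := by
  induction ws generalizing a b with
  | nil => rfl
  | cons w ws ih =>
    have h1 : pvExpand (w :: ws) (a ++ b)
        = pvExpand ws ((a ++ b).flatMap (fun x => [x, x + w])) := rfl
    rw [h1, List.flatMap_append, ih]
    rfl

theorem pvExpand_cons (w : Int) (ws : List Int) (b : Int) :
    pvExpand (w :: ws) [b] = pvExpand ws [b] ++ pvExpand ws [b + w] := by
  have h1 : pvExpand (w :: ws) [b] = pvExpand ws ([b] ++ [b + w]) := by
    simp [pvExpand]
  rw [h1, pvExpand_append]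

theorem pvInt2?_ok {m : List Char} (hne : m ≠ [])
    (hok : ∀ c ∈ m, c = '0' ∨ c = '1' ∨ c = 'X') (h0 : m.count 'X' = 0) :
    pvInt2? m = some (pvBval m) := by
  have hx : 'X' ∉ m := List.count_eq_zero.1 h0
  have hall : m.all (fun c => c = '0' || c = '1') = true := by
    rw [List.all_eq_true]
    intro c hc
    rcases hok c hc with h | h | h
    · simp [h]
    · simp [h]
    · exact absurd (h ▸ hc) hx
  rw [pvInt2?, if_pos ⟨hne, hall⟩]
  rfl

-- B's right-to-left scan computes (pvBval m, (pvWts m).reverse, 2 ^ |m|)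
theorem pvScan_eq (m : List Char) :
    m.reverse.foldl
      (fun (p : Int × List Int × Int) c =>
        if c = '1' then (p.1 + p.2.2, p.2.1, p.2.2 * 2)
        else if c = 'X' then (p.1, p.2.1 ++ [p.2.2], p.2.2 * 2)
        else (p.1, p.2.1, p.2.2 * 2))
      ((0 : Int), ([] : List Int), (1 : Int))
      = (pvBval m, (pvWts m).reverse, (2 : Int) ^ m.length) := by
  rw [List.foldl_reverse]
  induction m with
  | nil => simp [pvBval, pvWts]
  | cons c t ih =>
    rw [List.foldr_cons, ih]
    by_cases h1 : c = '1'
    · subst h1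
      rw [if_pos rfl, pvBval_cons, if_pos rfl,
        show pvWts ('1' :: t) = pvWts t from by simp [pvWts]]
      simp [pow_succ, add_comm]
    · by_cases hX : c = 'X'
      · subst hX
        rw [if_neg (by decide : ¬ ('X' : Char) = '1'), if_pos rfl, pvBval_cons,
          if_neg (by decide : ¬ ('X' : Char) = '1'),
          show pvWts ('X' :: t) = (2 : Int) ^ t.length :: pvWts t from by simp [pvWts]]
        simp [pow_succ]
      · rw [if_neg h1, if_neg hX, pvBval_cons, if_neg h1,
          show pvWts (c :: t) = pvWts t from by simp [pvWts, hX]]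
        simp [pow_succ]

-- A equals folding dict-assignment over the expanded address list
theorem pvAssignA_eq (m : List Char) (value : Int) (memory : List (Int × Int)) :
    m ≠ [] → (∀ c ∈ m, c = '0' ∨ c = '1' ∨ c = 'X') →
    pvAssignA m value memory
      = (pvExpand (pvWts m) [pvBval m]).foldl (fun d a => pvSet d a value) memory := by
  induction m, memory using pvAssignA.induct value with
  | case1 m memory h0 n heq =>
    intro hne hok
    have hv := pvInt2?_ok hne hok h0
    rw [pvAssignA, if_pos h0]
    rw [pvWts_eq_nil (List.count_eq_zero.1 h0)]
    split
    · rename_i n' heq'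
      rw [hv] at heq'
      injection heq' with hn
      subst hn
      simp [pvExpand]
    · rename_i heq'
      rw [hv] at heq'
      exact absurd heq' (by simp)
  | case2 m memory h0 heq =>
    intro hne hok
    rw [pvInt2?_ok hne hok h0] at heq
    exact absurd heq (by simp)
  | case3 m memory h0 heq =>
    intro hne hok
    have hmem : 'X' ∈ m := List.count_pos_iff.1 (Nat.pos_of_ne_zero h0)
    rw [PySem.List.index?_eq_none_iff] at heq
    exact absurd hmem heq
  | case4 m memory h0 x heq ih0 ih1 =>
    intro hne hok
    obtain ⟨pre, suf, hm, hlen, hpre⟩ := (PySem.List.index?_eq_some_iff _ _ _).1 heq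
    have htake : m.take x = pre := by rw [hm, ← hlen]; exact List.take_left
    have hdrop : m.drop (x + 1) = suf := by rw [hm, ← hlen]; simp
    have hsub : ∀ c : Char, (c = '0' ∨ c = '1' ∨ c = 'X') →
        (∀ d ∈ m.take x ++ c :: m.drop (x + 1), d = '0' ∨ d = '1' ∨ d = 'X') := by
      intro c hc d hd
      rw [htake, hdrop] at hd
      rcases List.mem_append.1 hd with h | h
      · exact hok d (by rw [hm]; exact List.mem_append.2 (Or.inl h))
      · rcases List.mem_cons.1 h with h | h
        · exact h ▸ hc
        · exact hok d (by
            rw [hm]; exact List.mem_append.2 (Or.inr (List.mem_cons.2 (Or.inr h))))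
    have hne' : ∀ c : Char, m.take x ++ c :: m.drop (x + 1) ≠ [] := by
      intro c h
      exact absurd (List.append_eq_nil_iff.1 h).2 (by simp)
    -- weights and base values of m and the two substituted strings
    have hwts : pvWts m = (2 : Int) ^ suf.length :: pvWts suf := by
      rw [hm, pvWts_append_of_not_mem _ hpre]; simp [pvWts]
    have hwts0 : pvWts (m.take x ++ '0' :: m.drop (x + 1)) = pvWts suf := by
      rw [htake, hdrop, pvWts_append_of_not_mem _ hpre]; simp [pvWts]
    have hwts1 : pvWts (m.take x ++ '1' :: m.drop (x + 1)) = pvWts suf := by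
      rw [htake, hdrop, pvWts_append_of_not_mem _ hpre]; simp [pvWts]
    have hb0 : pvBval (m.take x ++ '0' :: m.drop (x + 1)) = pvBval m := by
      rw [htake, hdrop, hm, pvBval_append, pvBval_append]
      simp [pvBval_cons]
    have hb1 : pvBval (m.take x ++ '1' :: m.drop (x + 1))
        = pvBval m + (2 : Int) ^ suf.length := by
      rw [htake, hdrop, hm, pvBval_append, pvBval_append]
      simp [pvBval_cons]
      ring
    rw [pvAssignA, if_neg h0]
    split
    · rename_i heq'
      rw [heq] at heq'
      exact absurd heq' (by simp)
    · rename_i x' heq'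
      rw [heq] at heq'
      injection heq' with hx
      subst hx
      rw [ih1 (hne' '1') (hsub '1' (by norm_num)),
        ih0 (hne' '0') (hsub '0' (by norm_num))]
      rw [hwts, hwts0, hwts1, hb0, hb1, pvExpand_cons, List.foldl_append]

-- ===== VERDICT (by name: the statement is the Claim_ definition above) =====
theorem assign_float_spec : Claim_equal_assign_float := by
  intro mem value memory _dom hpre
  obtain ⟨hne, hall⟩ := hpre
  have hok : ∀ c ∈ mem.toList, c = '0' ∨ c = '1' ∨ c = 'X' := by
    intro c hc
    have := List.all_eq_true.1 hall c hc
    simpa [or_assoc] using this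
  unfold Spec_assign_float assign_float assign_float_alt
  rw [pvAssignA_eq mem.toList value memory hne hok, pvScan_eq]
  simp [pvExpand]
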